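-- pv_equiv track=rewrite | github.com/Haaaam/PS | Programmers/Level1/과일_장수_re.py | solution
-- ===== SOURCE A (Python) =====
-- def solution(k,m,score):
--     answer=0
--     score=sorted(score,reverse=True) # 내림차순으로 정렬
--     # 한 상자에 담을 수 있는 사과 m개씩 확인하여 최대 이익 구하기
--     for i in range(0,len(score),m):
--         # 사과 1상자를 만들 수 있는 경우
--         if i+m<=len(score):
--             answer+=min(score[i:i+m])*m
--         # 사과 1상자 만들 수 없는 경우, 남는 사과 버리기
--         else:
--             break
--     return answer
-- ===== SOURCE B (Python) =====
-- def solution(k, m, score):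
--     # Value-counting instead of box scanning: tally each score with a dict, walk the
--     # distinct values from highest to lowest, and for each value compute arithmetically
--     # how many full boxes it is the minimum of (how many box-end positions its run of
--     # positions covers); no per-box slice/min is ever taken.
--     n = len(score)
--     full = (n // m) * m          # positions belonging to full boxes
--     counts = {}
--     for x in score:
--         counts[x] = counts.get(x, 0) + 1
--     answer = 0
--     pos = 0
--     for v in sorted(counts, reverse=True):
--         nxt = pos + counts[v]
--         answer += v * (min(nxt, full) // m - min(pos, full) // m)
--         pos = nxt
--     return m * answer
-- ===== Notes on version B (the rewrite author's own statement) =====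
-- stated objective: alternative
-- what changed: Replaces A's per-box scan (sort descending, min of each m-slice, break) by value counting: build a dict of score frequencies, walk the distinct values from highest to lowest, and for each value compute with floor-division arithmetic how many full boxes that value is the minimum of; no box slice or min is taken.
-- outside the precondition, e.g. on solution(0, -1, [1, 2]): A returns 0, B returns 3; on solution(0, 0, [1]): A raises ValueError, B raises ZeroDivisionError
import Mathlib
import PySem

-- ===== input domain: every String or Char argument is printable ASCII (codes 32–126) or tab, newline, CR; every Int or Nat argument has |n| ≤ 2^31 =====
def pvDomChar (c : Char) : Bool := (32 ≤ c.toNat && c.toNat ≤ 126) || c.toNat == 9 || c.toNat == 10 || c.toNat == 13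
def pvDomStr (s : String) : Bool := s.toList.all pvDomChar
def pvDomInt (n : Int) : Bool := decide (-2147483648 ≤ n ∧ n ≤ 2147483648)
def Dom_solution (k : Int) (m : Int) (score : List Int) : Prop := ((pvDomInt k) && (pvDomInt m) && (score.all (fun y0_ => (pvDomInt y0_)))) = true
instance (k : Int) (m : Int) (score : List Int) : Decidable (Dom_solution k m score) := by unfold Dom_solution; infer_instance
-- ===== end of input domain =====

-- B replaces A's per-box scan (sort, min of each m-slice, break) by value counting: a
-- frequency dict, distinct values walked highest-to-lowest, and floor-division arithmetic
-- on position counts deciding how many full boxes each value is the minimum of; objective: alternative.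

-- ===== PORT A =====
-- the 'for i in range(0, len(score), m)' loop with its break, over the sorted list s
def solutionLoopA (s : List Int) (m : Int) : List Int → Int → Int
  | [], acc => acc
  | i :: rest, acc =>
    if i + m ≤ (s.length : Int) then
      match PySem.List.min? (PySem.List.slice s (some i) (some (i + m))) (fun y => y) with
      | some v => solutionLoopA s m rest (acc + v * m)
      | none => acc          -- min([]) raises in Python; unreachable under Pre_solution
    else acc                 -- break

def solution (k : Int) (m : Int) (score : List Int) : Int :=
  let s := PySem.List.sorted score (fun x => x) true
  solutionLoopA s m (PySem.List.pyRange 0 (s.length : Int) m) 0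

-- ===== PORT B =====
def solution_alt (k : Int) (m : Int) (score : List Int) : Int :=
  let full := PySem.Int.floordiv (score.length : Int) m * m
  let counts := score.foldl (fun d x => d.insert x (d.getD x 0 + 1)) PySem.Dict.empty
  let res := (PySem.List.sorted counts.keys (fun x => x) true).foldl
      (fun (ap : Int × Int) v =>
        let nxt := ap.2 + counts.getD v 0
        (ap.1 + v * (PySem.Int.floordiv (min nxt full) m - PySem.Int.floordiv (min ap.2 full) m), nxt))
      (0, 0)
  m * res.1

-- ===== PRECONDITION & SPEC =====
-- Pre_ excludes m ≤ 0: at m = 0 both A and B raise (range step / division by zero); for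
-- m < 0 A's empty range(0, n, m) accidentally returns 0 while B's negative floor
-- divisions are a different accident — a degenerate corner no caller specifies.
def Pre_solution (k : Int) (m : Int) (score : List Int) : Prop := 1 ≤ m
instance (k : Int) (m : Int) (score : List Int) : Decidable (Pre_solution k m score) := by unfold Pre_solution; infer_instance
def pvWitness_solution : Int × Int × List Int := (4, 3, [1, 2, 3, 1, 2])

def Spec_solution (k : Int) (m : Int) (score : List Int) (out : Int) : Prop := out = solution_alt k m score
instance (k : Int) (m : Int) (score : List Int) (out : Int) : Decidable (Spec_solution k m score out) := by unfold Spec_solution; infer_instance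

-- ===== CLAIM (what is proved, stated in full; the proofs are below) =====
def Claim_equal_solution : Prop := ∀ (k : Int) (m : Int) (score : List Int), Dom_solution k m score → Pre_solution k m score → Spec_solution k m score (solution k m score)

-- ===== LEMMAS AND PROOFS =====

-- ---------- A-side: A's loop is m * (sum of the last elements of the full boxes) ----------

-- sum of the last elements of the full (Mp+1)-sized boxes of s
def strideSum (Mp : Nat) (s : List Int) : Int :=
  if _h : Mp + 1 ≤ s.length then s.getD Mp 0 + strideSum Mp (s.drop (Mp + 1)) else 0
termination_by s.length
decreasing_by simp [List.length_drop]; omega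

-- min of a descending-sorted list is its last element
theorem foldl_min_desc (t : List Int) : ∀ (x : Int), List.Pairwise (fun a b : Int => b ≤ a) (x :: t) →
    List.foldl min x t = (x :: t).getLast (List.cons_ne_nil x t) := by
  induction t with
  | nil => intro x _; simp
  | cons y t' ih =>
    intro x h
    have hyx : y ≤ x := (List.pairwise_cons.mp h).1 y (by simp)
    have h' : List.Pairwise (fun a b : Int => b ≤ a) (y :: t') := (List.pairwise_cons.mp h).2
    have : min x y = y := min_eq_right hyx
    simp only [List.foldl_cons, this]
    rw [ih y h']
    simp [List.getLast_cons]

theorem min?_desc (xs : List Int) (h : List.Pairwise (fun a b : Int => b ≤ a) xs) :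
    PySem.List.min? xs (fun y => y) = xs.getLast? := by
  cases xs with
  | nil => simp [PySem.List.min?]
  | cons x t =>
    rw [PySem.List.min?_id_cons, foldl_min_desc t x h, List.getLast?_eq_some_getLast]

-- positive-step pyRange peels its head
theorem pyRange_pos_cons (a b : Int) {m : Int} (hm : 0 < m) (hab : a < b) :
    PySem.List.pyRange a b m = a :: PySem.List.pyRange (a + m) b m := by
  rw [PySem.List.pyRange_of_pos a b hm, PySem.List.pyRange_of_pos (a+m) b hm]
  have hcount : (if a < b then ((b - a + m - 1) / m).toNat else 0)
      = (if a + m < b then ((b - (a + m) + m - 1) / m).toNat else 0) + 1 := by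
    rw [if_pos hab]
    by_cases h2 : a + m < b
    · rw [if_pos h2]
      have : b - a + m - 1 = (b - (a + m) + m - 1) + 1 * m := by ring
      rw [this, Int.add_mul_ediv_right _ _ (by omega : m ≠ 0)]
      have hge : 0 ≤ (b - (a + m) + m - 1) / m := Int.ediv_nonneg (by omega) (by omega)
      omega
    · rw [if_neg h2]
      have h1 : (b - a + m - 1) / m = 1 := by
        have he : b - a + m - 1 = (b - a - 1) + 1 * m := by ring
        rw [he, Int.add_mul_ediv_right _ _ (by omega : m ≠ 0),
            Int.ediv_eq_zero_of_lt (by omega) (by omega)]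
        omega
      rw [h1]
      rfl
  rw [hcount, List.range_succ_eq_map, List.map_cons]
  simp only [List.map_map]
  congr 1
  · omega
  · apply List.map_congr_left
    intro x _
    simp only [Function.comp_apply]
    push_cast
    ring

-- A's loop over range(i, len(s), m) computes m * strideSum of the tail from i
theorem loopA_eq (s : List Int) (Mp : Nat) (hs : List.Pairwise (fun a b : Int => b ≤ a) s) :
    ∀ (fuel i : Nat) (acc : Int), s.length ≤ i + fuel →
      solutionLoopA s ((Mp : Int) + 1) (PySem.List.pyRange (i : Int) (s.length : Int) ((Mp : Int) + 1)) acc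
        = acc + ((Mp : Int) + 1) * strideSum Mp (s.drop i) := by
  intro fuel
  induction fuel with
  | zero =>
    intro i acc hle
    have hnil : PySem.List.pyRange (i : Int) (s.length : Int) ((Mp : Int) + 1) = [] := by
      rw [PySem.List.pyRange_of_pos _ _ (by omega)]
      rw [if_neg (by exact_mod_cast by omega)]
      simp
    rw [hnil]
    rw [strideSum]
    rw [dif_neg (by rw [List.length_drop]; omega)]
    simp [solutionLoopA]
  | succ fuel ih =>
    intro i acc hle
    by_cases hin : i < s.length
    · rw [pyRange_pos_cons _ _ (by omega) (by exact_mod_cast hin)]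
      by_cases hfull : i + (Mp + 1) ≤ s.length
      · -- full box
        have hcond : (i : Int) + ((Mp : Int) + 1) ≤ (s.length : Int) := by exact_mod_cast hfull
        have hslice : PySem.List.slice s (some (i : Int)) (some ((i : Int) + ((Mp : Int) + 1)))
            = (s.drop i).take (Mp + 1) := by
          rw [PySem.List.slice_toNat s (by positivity) (by positivity)]
          congr 1 <;> omega
        have htl : ((s.drop i).take (Mp + 1)).length = Mp + 1 := by
          rw [List.length_take, List.length_drop]; omega
        have hpsub : List.Pairwise (fun a b : Int => b ≤ a) ((s.drop i).take (Mp + 1)) :=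
          ((hs.sublist (List.drop_sublist i s)).sublist (List.take_sublist _ _))
        have hlast : ((s.drop i).take (Mp + 1)).getLast? = some ((s.drop i).getD Mp 0) := by
          rw [List.getLast?_eq_getElem?, htl]
          simp only [Nat.add_sub_cancel]
          rw [List.getElem?_take, if_pos (by omega)]
          have hMl : Mp < (s.drop i).length := by rw [List.length_drop]; omega
          rw [List.getElem?_eq_getElem hMl]
          simp [List.getD, List.getElem?_eq_getElem hMl]
        have hmin : PySem.List.min? (PySem.List.slice s (some (i:Int)) (some ((i:Int) + ((Mp:Int) + 1)))) (fun y => y)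
            = some ((s.drop i).getD Mp 0) := by
          rw [hslice, min?_desc _ hpsub, hlast]
        simp only [solutionLoopA, if_pos hcond, hmin]
        have hcast : (i : Int) + ((Mp : Int) + 1) = ((i + (Mp + 1) : Nat) : Int) := by push_cast; ring
        rw [hcast, ih (i + (Mp + 1)) _ (by omega)]
        have hR : strideSum Mp (List.drop i s)
            = (List.drop i s).getD Mp 0 + strideSum Mp ((List.drop i s).drop (Mp + 1)) := by
          rw [strideSum]; rw [dif_pos (by rw [List.length_drop]; omega)]
        have hdd : (List.drop i s).drop (Mp + 1) = List.drop (i + (Mp + 1)) s := by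
          rw [List.drop_drop]
        rw [hR, hdd]
        ring
      · -- partial box: break
        have hcond : ¬ ((i : Int) + ((Mp : Int) + 1) ≤ (s.length : Int)) := by exact_mod_cast hfull
        simp only [solutionLoopA, if_neg hcond]
        rw [strideSum, dif_neg (by rw [List.length_drop]; omega)]
        ring
    · have hnil : PySem.List.pyRange (i : Int) (s.length : Int) ((Mp : Int) + 1) = [] := by
        rw [PySem.List.pyRange_of_pos _ _ (by omega), if_neg (by exact_mod_cast by omega)]
        simp
      rw [hnil, strideSum, dif_neg (by rw [List.length_drop]; omega)]
      simp [solutionLoopA]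

-- stride sum as an indexed sum over the number of full boxes
theorem strideSum_eq_sum (Mp : Nat) : ∀ (n : Nat) (s : List Int), s.length ≤ n →
    strideSum Mp s = ((List.range (s.length / (Mp + 1))).map (fun k => s.getD (Mp + (Mp + 1) * k) 0)).sum := by
  intro n
  induction n with
  | zero =>
    intro s hle
    rw [strideSum, dif_neg (by omega)]
    rw [Nat.div_eq_of_lt (by omega)]
    simp
  | succ n ih =>
    intro s hle
    by_cases h : Mp + 1 ≤ s.length
    · rw [strideSum, dif_pos h]
      rw [ih (s.drop (Mp + 1)) (by rw [List.length_drop]; omega)]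
      have hq : s.length / (Mp + 1) = (s.drop (Mp + 1)).length / (Mp + 1) + 1 := by
        rw [List.length_drop]
        rw [Nat.div_eq_sub_div (by omega) h]
      rw [hq, List.range_succ_eq_map, List.map_cons, List.sum_cons]
      congr 1
      apply congrArg
      rw [List.map_map]
      apply List.map_congr_left
      intro x _
      simp only [Function.comp_apply, Nat.succ_eq_add_one, List.getD, List.getElem?_drop]
      have : Mp + 1 + (Mp + (Mp + 1) * x) = Mp + (Mp + 1) * (x + 1) := by ring
      rw [this]
    · rw [strideSum, dif_neg h, Nat.div_eq_of_lt (by omega)]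
      simp

-- ---------- B-side: the counting fold is the same indexed sum ----------

-- number of full-box end positions strictly below position min j fullN
def gBox (M fullN : Nat) (j : Nat) : Int := ((min j fullN) / M : Nat)

-- per-element telescoping sum: element at position p+i contributes x * (g(p+i+1) - g(p+i))
def elemSum (g : Nat → Int) : List Int → Nat → Int
  | [], _ => 0
  | x :: t, p => x * (g (p + 1) - g p) + elemSum g t (p + 1)

-- per-run telescoping sum: a run of c v equal values telescopes to v * (g(p+c) - g(p))
def runSum (g : Nat → Int) (c : Int → Nat) : List Int → Nat → Int
  | [], _ => 0
  | v :: vs, p => v * (g (p + c v) - g p) + runSum g c vs (p + c v)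

theorem gBox_diff (M fullN j : Nat) (hM : 1 ≤ M) :
    gBox M fullN (j + 1) - gBox M fullN j
      = if j % M = M - 1 ∧ j < fullN then 1 else 0 := by
  unfold gBox
  by_cases hj : j < fullN
  · rw [Nat.min_eq_left (by omega), Nat.min_eq_left (by omega)]
    obtain ⟨q, r, hr, rfl⟩ : ∃ q r, r < M ∧ j = M * q + r :=
      ⟨j / M, j % M, Nat.mod_lt _ (by omega), (Nat.div_add_mod j M).symm⟩
    have hdivj : (M * q + r) / M = q := by
      rw [Nat.mul_add_div (by omega), Nat.div_eq_of_lt hr]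
      omega
    have hmod : (M * q + r) % M = r := by
      rw [Nat.mul_add_mod, Nat.mod_eq_of_lt hr]
    by_cases hr1 : r = M - 1
    · have he : M * q + r + 1 = M * (q + 1) := by
        have h2 : M * (q + 1) = M * q + M := by ring
        omega
      rw [he, Nat.mul_div_cancel_left _ (by omega : 0 < M), hdivj, hmod,
          if_pos ⟨hr1, hj⟩]
      push_cast; ring
    · have hdivj1 : (M * q + r + 1) / M = q := by
        rw [Nat.add_assoc, Nat.mul_add_div (by omega), Nat.div_eq_of_lt (by omega)]
        omega
      rw [hdivj1, hdivj, hmod, if_neg (by tauto)]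
      omega
  · rw [Nat.min_eq_right (by omega), Nat.min_eq_right (by omega),
        if_neg (by tauto)]
    omega

-- B's fold over the distinct values computes runSum
theorem foldB (M fullN : Nat) (_hM : 1 ≤ M) (c : Int → Nat) :
    ∀ (vs : List Int) (a : Int) (p : Nat),
      vs.foldl
        (fun (ap : Int × Int) v =>
          (ap.1 + v * (PySem.Int.floordiv (min (ap.2 + (c v : Int)) ((fullN : Nat) : Int)) ((M : Nat) : Int)
              - PySem.Int.floordiv (min ap.2 ((fullN : Nat) : Int)) ((M : Nat) : Int)),
           ap.2 + (c v : Int)))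
        (a, (p : Int))
      = (a + runSum (gBox M fullN) c vs p, ((p + (vs.map c).sum : Nat) : Int)) := by
  intro vs
  induction vs with
  | nil => intro a p; simp [runSum]
  | cons v vs ih =>
    intro a p
    simp only [List.foldl_cons]
    have h2 : (p : Int) + (c v : Int) = ((p + c v : Nat) : Int) := by push_cast; ring
    have hmin : ∀ (x : Nat), min ((x : Nat) : Int) ((fullN : Nat) : Int) = ((min x fullN : Nat) : Int) := by
      intro x; push_cast [Nat.cast_min]; rfl
    rw [h2, ih]
    simp only [runSum, List.map_cons, List.sum_cons]
    simp only [Prod.mk.injEq]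
    constructor
    · rw [hmin, hmin]
      rw [PySem.Int.floordiv_natCast, PySem.Int.floordiv_natCast]
      unfold gBox
      ring
    · congr 1
      omega

-- a run of equal values telescopes elementwise
theorem elemSum_replicate_append (g : Nat → Int) (v : Int) :
    ∀ (cv : Nat) (t : List Int) (p : Nat),
      elemSum g (List.replicate cv v ++ t) p = v * (g (p + cv) - g p) + elemSum g t (p + cv) := by
  intro cv
  induction cv with
  | zero => intro t p; simp [List.replicate]
  | succ n ih =>
    intro t p
    rw [List.replicate_succ, List.cons_append]
    show v * (g (p + 1) - g p) + elemSum g (List.replicate n v ++ t) (p + 1) = _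
    rw [ih]
    have h1 : p + 1 + n = p + (n + 1) := by omega
    rw [h1]
    ring

theorem runSum_eq_elemSum (g : Nat → Int) (c : Int → Nat) :
    ∀ (vs : List Int) (p : Nat),
      runSum g c vs p = elemSum g (vs.flatMap (fun v => List.replicate (c v) v)) p := by
  intro vs
  induction vs with
  | nil => intro p; simp [runSum, elemSum]
  | cons v vs ih =>
    intro p
    rw [List.flatMap_cons, elemSum_replicate_append]
    show v * (g (p + c v) - g p) + runSum g c vs (p + c v) = _
    rw [ih]

-- elemSum as an indexed sum
theorem elemSum_eq_sum (g : Nat → Int) :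
    ∀ (t : List Int) (p : Nat),
      elemSum g t p = ((List.range t.length).map (fun j => t.getD j 0 * (g (p + j + 1) - g (p + j)))).sum := by
  intro t
  induction t with
  | nil => intro p; simp [elemSum]
  | cons x t ih =>
    intro p
    show x * (g (p + 1) - g p) + elemSum g t (p + 1) = _
    rw [ih]
    rw [List.length_cons, List.range_succ_eq_map, List.map_cons, List.sum_cons, List.map_map]
    have hmap : List.map ((fun j => (x :: t).getD j 0 * (g (p + j + 1) - g (p + j))) ∘ Nat.succ) (List.range t.length)
        = List.map (fun j => t.getD j 0 * (g (p + 1 + j + 1) - g (p + 1 + j))) (List.range t.length) := by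
      apply List.map_congr_left
      intro j _
      simp only [Function.comp_apply, Nat.succ_eq_add_one, List.getD_cons_succ]
      have h1 : p + (j + 1) + 1 = p + 1 + j + 1 := by omega
      have h2 : p + (j + 1) = p + 1 + j := by omega
      rw [h1, h2]
    rw [hmap, List.getD_cons_zero]
    simp

theorem block_sum (s : List Int) (Mp : Nat) :
    ∀ (q : Nat),
      ((List.range (q * (Mp + 1))).map (fun j => if j % (Mp + 1) = Mp then s.getD j 0 else 0)).sum
        = ((List.range q).map (fun k => s.getD (Mp + (Mp + 1) * k) 0)).sum := by
  intro q
  induction q with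
  | zero => simp
  | succ q ih =>
    rw [show (q + 1) * (Mp + 1) = q * (Mp + 1) + (Mp + 1) by ring, List.range_add,
        List.map_append, List.sum_append, ih, List.range_succ (n := q), List.map_append, List.sum_append]
    congr 1
    simp only [List.map_map, List.map_cons, List.map_nil, List.sum_cons, List.sum_nil]
    have hz : ((List.range Mp).map ((fun j => if j % (Mp + 1) = Mp then s.getD j 0 else 0) ∘
        fun x => q * (Mp + 1) + x)).sum = 0 := by
      apply List.sum_eq_zero
      intro x hx
      simp only [List.mem_map] at hx
      obtain ⟨r, hr, rfl⟩ := hx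
      rw [List.mem_range] at hr
      simp only [Function.comp_apply]
      rw [if_neg]
      rw [Nat.mul_add_mod', Nat.mod_eq_of_lt (by omega)]
      omega
    rw [List.range_succ (n := Mp), List.map_append, List.sum_append, hz, zero_add]
    simp only [List.map_cons, List.map_nil, List.sum_cons, List.sum_nil, Function.comp_apply]
    rw [if_pos]
    · rw [add_zero, add_zero]
      congr 1
      ring
    · rw [Nat.mul_add_mod', Nat.mod_eq_of_lt (by omega)]

-- the indicator sum re-indexed over the full boxes
theorem sum_indicator_eq (M : Nat) (hM : 1 ≤ M) (s : List Int) :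
    ((List.range s.length).map
        (fun j => if j % M = M - 1 ∧ j < (s.length / M) * M then s.getD j 0 else 0)).sum
      = ((List.range (s.length / M)).map (fun k => s.getD ((M - 1) + M * k) 0)).sum := by
  obtain ⟨Mp, rfl⟩ : ∃ Mp, M = Mp + 1 := ⟨M - 1, by omega⟩
  simp only [Nat.add_sub_cancel]
  have hfull : (s.length / (Mp + 1)) * (Mp + 1) ≤ s.length := Nat.div_mul_le_self _ _
  have hr : List.range s.length
      = List.range ((s.length / (Mp + 1)) * (Mp + 1))
        ++ (List.range (s.length - (s.length / (Mp + 1)) * (Mp + 1))).map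
            (fun x => (s.length / (Mp + 1)) * (Mp + 1) + x) := by
    conv_lhs => rw [show s.length = (s.length / (Mp + 1)) * (Mp + 1)
      + (s.length - (s.length / (Mp + 1)) * (Mp + 1)) by omega]
    exact List.range_add
  rw [hr, List.map_append, List.sum_append, List.map_map]
  have htail : ((List.range (s.length - s.length / (Mp + 1) * (Mp + 1))).map
      ((fun j => if j % (Mp + 1) = Mp ∧ j < s.length / (Mp + 1) * (Mp + 1) then s.getD j 0 else 0) ∘
        fun x => s.length / (Mp + 1) * (Mp + 1) + x)).sum = 0 := by
    apply List.sum_eq_zero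
    intro x hx
    simp only [List.mem_map] at hx
    obtain ⟨r, _, rfl⟩ := hx
    simp only [Function.comp_apply]
    rw [if_neg (by omega)]
  rw [htail, add_zero]
  have hhead : ((List.range (s.length / (Mp + 1) * (Mp + 1))).map
      (fun j => if j % (Mp + 1) = Mp ∧ j < s.length / (Mp + 1) * (Mp + 1) then s.getD j 0 else 0)).sum
      = ((List.range (s.length / (Mp + 1) * (Mp + 1))).map
          (fun j => if j % (Mp + 1) = Mp then s.getD j 0 else 0)).sum := by
    apply congrArg
    apply List.map_congr_left
    intro j hj
    rw [List.mem_range] at hj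
    by_cases hc : j % (Mp + 1) = Mp
    · rw [if_pos ⟨hc, hj⟩, if_pos hc]
    · rw [if_neg (by tauto), if_neg hc]
  rw [hhead, block_sum s Mp (s.length / (Mp + 1))]

-- the run-length expansion of the distinct sorted values is the sorted list itself
theorem flat_count (c : Int → Nat) :
    ∀ (l : List Int), l.Nodup → ∀ (w : Int),
      (l.flatMap (fun v => List.replicate (c v) v)).count w = if w ∈ l then c w else 0 := by
  intro l
  induction l with
  | nil => intro _ w; simp
  | cons v l ih =>
    intro hnd w
    rw [List.flatMap_cons, List.count_append, ih (List.nodup_cons.mp hnd).2 w]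
    rw [List.count_replicate]
    by_cases hw : w = v
    · subst hw
      have : w ∉ l := (List.nodup_cons.mp hnd).1
      simp [this]
    · simp only [beq_iff_eq, if_neg (fun h : v = w => hw h.symm), zero_add]
      by_cases hm : w ∈ l
      · rw [if_pos hm, if_pos (by simp [hm])]
      · rw [if_neg hm, if_neg (by simp [hw, hm])]

theorem flat_pairwise (c : Int → Nat) :
    ∀ (l : List Int), List.Pairwise (fun a b : Int => b < a) l →
      List.Pairwise (fun a b : Int => b ≤ a) (l.flatMap (fun v => List.replicate (c v) v)) := by
  intro l
  induction l with
  | nil => intro _; simp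
  | cons v l ih =>
    intro hp
    rw [List.flatMap_cons]
    apply List.pairwise_append.mpr
    refine ⟨?_, ih hp.tail, ?_⟩
    · rw [List.pairwise_replicate]
      right; exact le_refl v
    · intro x hx y hy
      have hxv : x = v := List.eq_of_mem_replicate hx
      obtain ⟨u, hu, hyu⟩ := List.mem_flatMap.mp hy
      have hyv : y = u := List.eq_of_mem_replicate hyu
      subst hxv; subst hyv
      exact le_of_lt ((List.pairwise_cons.mp hp).1 _ hu)

theorem flat_eq_sorted (score : List Int) :
    (PySem.List.sorted (PySem.Set.ofList score : List Int) (fun x => x) true).flatMap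
        (fun v => List.replicate (score.count v) v)
      = PySem.List.sorted score (fun x => x) true := by
  have hkd_perm : (PySem.List.sorted (PySem.Set.ofList score : List Int) (fun x => x) true).Perm
      (PySem.Set.ofList score : List Int) := PySem.List.sorted_perm _ _ _
  have hkd_nodup : (PySem.List.sorted (PySem.Set.ofList score : List Int) (fun x => x) true).Nodup :=
    hkd_perm.nodup_iff.mpr (PySem.Set.nodup_ofList score)
  have hkd_pw : List.Pairwise (fun a b : Int => b < a)
      (PySem.List.sorted (PySem.Set.ofList score : List Int) (fun x => x) true) := by
    have h1 := PySem.List.sorted_pairwise_rev (PySem.Set.ofList score : List Int) (fun x => x)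
    have := List.Pairwise.and h1 hkd_nodup
    exact this.imp (fun {a b} h => lt_of_le_of_ne h.1 (fun he => h.2 he.symm))
  have hmemkd : ∀ w : Int, w ∈ (PySem.List.sorted (PySem.Set.ofList score : List Int) (fun x => x) true) ↔ w ∈ score := by
    intro w
    rw [PySem.List.mem_sorted, PySem.Set.mem_ofList]
  -- permutation with score
  have hperm : ((PySem.List.sorted (PySem.Set.ofList score : List Int) (fun x => x) true).flatMap
      (fun v => List.replicate (score.count v) v)).Perm score := by
    rw [List.perm_iff_count]
    intro w
    rw [flat_count _ _ hkd_nodup w]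
    by_cases hm : w ∈ score
    · rw [if_pos ((hmemkd w).mpr hm)]
    · rw [if_neg (fun h => hm ((hmemkd w).mp h)), eq_comm, List.count_eq_zero]
      exact hm
  apply List.eq_of_perm_of_sorted (le := fun a b : Int => b ≤ a)
  · intro a b _ _ h1 h2; omega
  · exact flat_pairwise _ _ hkd_pw
  · exact PySem.List.sorted_pairwise_rev score (fun x => x)
  · exact hperm.trans (PySem.List.sorted_perm score (fun x => x) true).symm

-- ===== VERDICT (by name: the statement is the Claim_ definition above) =====
theorem solution_spec : Claim_equal_solution := by
  intro k m score _ hpre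
  unfold Spec_solution
  have hm : (1 : Int) ≤ m := hpre
  obtain ⟨Mp, rfl⟩ : ∃ Mp : Nat, m = (Mp : Int) + 1 := ⟨(m - 1).toNat, by omega⟩
  simp only [solution, solution_alt]
  have hs := PySem.List.sorted_pairwise_rev score (fun x => x)
  have h0 : ((0 : Nat) : Int) = 0 := rfl
  have hA := loopA_eq (PySem.List.sorted score (fun x => x) true) Mp hs
      (PySem.List.sorted score (fun x => x) true).length 0 0 (by omega)
  simp only [List.drop_zero, h0] at hA
  rw [hA, strideSum_eq_sum Mp (PySem.List.sorted score (fun x => x) true).length _ (le_refl _)]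
  have hgetD : ∀ v : Int, (List.foldl (fun d x => d.insert x (d.getD x 0 + 1)) PySem.Dict.empty score).getD v 0
      = ((score.count v : Nat) : Int) := by
    intro v
    rw [PySem.Dict.getD_foldl_insert_add_one, PySem.Dict.getD_empty]
    simp
  have hkeys : (List.foldl (fun (d : PySem.Dict Int Int) (x : Int) => d.insert x (d.getD x 0 + 1)) PySem.Dict.empty score).keys
      = (PySem.Set.ofList score : List Int) := by
    rw [PySem.Dict.keys_foldl_insert]
    rfl
  have hMcast : ((Mp : Int) + 1) = ((Mp + 1 : Nat) : Int) := by push_cast; ring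
  have hfull : PySem.Int.floordiv ((score.length : Nat) : Int) ((Mp : Int) + 1) * ((Mp : Int) + 1)
      = ((score.length / (Mp + 1) * (Mp + 1) : Nat) : Int) := by
    rw [hMcast, PySem.Int.floordiv_natCast]
    push_cast
    ring
  simp only [hgetD, hfull]
  have hfold := foldB (Mp + 1) (score.length / (Mp + 1) * (Mp + 1)) (by omega) (fun v => score.count v)
      (PySem.List.sorted (PySem.Set.ofList score : List Int) (fun x => x) true) 0 0
  simp only [h0] at hfold
  rw [hMcast, hkeys, hfold]
  simp only [zero_add]
  rw [runSum_eq_elemSum, flat_eq_sorted score, elemSum_eq_sum]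
  simp only [zero_add]
  have hcong : ∀ j ∈ List.range (PySem.List.sorted score (fun x => x) true).length,
      (PySem.List.sorted score (fun x => x) true).getD j 0
          * (gBox (Mp + 1) (score.length / (Mp + 1) * (Mp + 1)) (j + 1)
            - gBox (Mp + 1) (score.length / (Mp + 1) * (Mp + 1)) j)
        = if j % (Mp + 1) = Mp ∧ j < score.length / (Mp + 1) * (Mp + 1) then
            (PySem.List.sorted score (fun x => x) true).getD j 0 else 0 := by
    intro j _
    rw [gBox_diff _ _ _ (by omega)]
    simp only [Nat.add_sub_cancel]
    rw [mul_ite, mul_one, mul_zero]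
  rw [List.map_congr_left hcong]
  have hlen : (PySem.List.sorted score (fun x => x) true).length = score.length :=
    PySem.List.length_sorted _ _ _
  rw [show score.length = (PySem.List.sorted score (fun x => x) true).length from hlen.symm]
  have hsi := sum_indicator_eq (Mp + 1) (by omega) (PySem.List.sorted score (fun x => x) true)
  simp only [Nat.add_sub_cancel] at hsi
  rw [hsi]
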